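-- pv_equiv track=rewrite | github.com/federicoarielcasado/py-param-cad | cad_generator/data/repositories.py | _increment_revision_code
-- ===== SOURCE A (Python) =====
-- def _increment_revision_code(code: str) -> str:
--     """
--     Increment an alphabetic revision code.
--
--     Examples:
--         'A'  -> 'B'
--         'Z'  -> 'AA'
--         'AA' -> 'AB'
--         'AZ' -> 'BA'
--         'ZZ' -> 'AAA'
--     """
--     chars = list(code.upper())
--     carry = True
--     idx = len(chars) - 1
--     while carry and idx >= 0:
--         if chars[idx] == "Z":
--             chars[idx] = "A"
--             idx -= 1
--         else:
--             chars[idx] = chr(ord(chars[idx]) + 1)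
--             carry = False
--     if carry:
--         chars.insert(0, "A")
--     return "".join(chars)
-- ===== SOURCE B (Python) =====
-- def _increment_revision_code(code: str) -> str:
--     def inc(s: str) -> str:
--         if not s:
--             return "A"
--         if s[-1] == "Z":
--             return inc(s[:-1]) + "A"
--         return s[:-1] + chr(ord(s[-1]) + 1)
--     return inc(code.upper())
-- ===== Notes on version B (the rewrite author's own statement) =====
-- stated objective: alternative
-- what changed: Replaced the imperative carry loop with mutable index/carry flags and in-place list surgery by a structural recursion on the string: empty input yields the initial code, a trailing last letter that overflows recurses on the prefix and appends the reset letter, otherwise the last character is bumped.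
import Mathlib
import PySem

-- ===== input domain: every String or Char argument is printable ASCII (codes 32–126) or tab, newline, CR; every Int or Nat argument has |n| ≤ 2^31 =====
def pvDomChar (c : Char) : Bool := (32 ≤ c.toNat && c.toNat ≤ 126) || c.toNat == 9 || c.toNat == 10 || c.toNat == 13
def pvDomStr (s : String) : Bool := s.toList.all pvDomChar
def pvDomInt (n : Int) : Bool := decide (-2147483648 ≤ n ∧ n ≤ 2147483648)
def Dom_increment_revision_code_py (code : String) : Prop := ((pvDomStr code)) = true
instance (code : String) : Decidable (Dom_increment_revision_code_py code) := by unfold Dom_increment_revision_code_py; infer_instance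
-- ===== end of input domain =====

-- B replaces A's imperative carry loop by a structural recursion on the string (alternative decomposition, same cost).
-- ===== PORT A =====
-- A's while loop: fuel = idx+1 (fuel 0 ⇔ python idx = -1); returns (chars, carry-after-loop).
def pvALoop (chars : List Char) : Nat → (List Char × Bool)
  | 0 => (chars, true)
  | i + 1 =>
      if chars.getD i ' ' == 'Z' then
        pvALoop (chars.set i 'A') i
      else
        (chars.set i (Char.ofNat ((chars.getD i ' ').toNat + 1)), false)

def increment_revision_code_py (code : String) : String :=
  let chars := (PySem.Str.upper code).toList
  let r := pvALoop chars chars.length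
  String.ofList (if r.2 then 'A' :: r.1 else r.1)

-- ===== PORT B =====
-- Source B's inner recursion over the string (on its character list)
def pvInc (s : List Char) : List Char :=
  if s = [] then ['A']
  else if s.getLast! == 'Z' then
    pvInc s.dropLast ++ ['A']
  else
    s.dropLast ++ [Char.ofNat (s.getLast!.toNat + 1)]
termination_by s.length
decreasing_by
  rename_i h _
  have := List.length_pos_iff.mpr h
  simp [List.length_dropLast]; omega

def increment_revision_code_py_alt (code : String) : String :=
  String.ofList (pvInc (PySem.Str.upper code).toList)

-- ===== PRECONDITION & SPEC =====
def Spec_increment_revision_code_py (code : String) (out : String) : Prop := out = increment_revision_code_py_alt code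
instance (code : String) (out : String) : Decidable (Spec_increment_revision_code_py code out) := by unfold Spec_increment_revision_code_py; infer_instance

-- ===== CLAIM (what is proved, stated in full; the proofs are below) =====
def Claim_equal_increment_revision_code_py : Prop := ∀ (code : String), Dom_increment_revision_code_py code → Spec_increment_revision_code_py code (increment_revision_code_py code)

-- ===== LEMMAS AND PROOFS =====

-- the loop with fuel ≤ ds.length never touches an appended suffix
theorem pvALoop_append (ds xs : List Char) (n : Nat) (h : n ≤ ds.length) :
    pvALoop (ds ++ xs) n = ((pvALoop ds n).1 ++ xs, (pvALoop ds n).2) := by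
  induction n generalizing ds with
  | zero => simp [pvALoop]
  | succ i ih =>
    have hi : i < ds.length := h
    rw [pvALoop, pvALoop, List.getD_append _ _ _ _ hi,
        List.set_append_left _ _ hi, List.set_append_left _ _ hi]
    split
    · exact ih _ (by simp; omega)
    · rfl

theorem pvInc_concat (ds : List Char) (c : Char) :
    pvInc (ds ++ [c]) =
      if c == 'Z' then pvInc ds ++ ['A'] else ds ++ [Char.ofNat (c.toNat + 1)] := by
  rw [pvInc]
  simp

theorem pvALoop_eq_pvInc (cs : List Char) :
    (if (pvALoop cs cs.length).2 then 'A' :: (pvALoop cs cs.length).1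
     else (pvALoop cs cs.length).1) = pvInc cs := by
  induction cs using List.reverseRecOn with
  | nil => rw [pvInc]; simp [pvALoop]
  | append_singleton ds c ih =>
    have hget : (ds ++ [c]).getD ds.length ' ' = c := by
      simp
    have hset : ∀ v, (ds ++ [c]).set ds.length v = ds ++ [v] := by
      intro v
      rw [List.set_append_right _ _ (le_refl _)]
      simp
    have hlen : (ds ++ [c]).length = ds.length + 1 := by simp
    rw [pvInc_concat, hlen, pvALoop, hget, hset, hset]
    by_cases hc : c = 'Z'
    · subst hc
      simp only [beq_self_eq_true, if_true]
      rw [pvALoop_append ds ['A'] ds.length (le_refl _), ← ih]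
      split <;> simp
    · simp [hc]

-- ===== VERDICT (by name: the statement is the Claim_ definition above) =====
theorem increment_revision_code_py_spec : Claim_equal_increment_revision_code_py := by
  intro code _
  unfold Spec_increment_revision_code_py increment_revision_code_py increment_revision_code_py_alt
  rw [← pvALoop_eq_pvInc]
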